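-- pv_equiv track=rewrite | github.com/clearl7/2020tdb_c | 第一题/classification.py | n_containing
-- ===== SOURCE A (Python) =====
-- def n_containing(word, count_list,lcontent,clabel):
--     """
--     统计在第i类包含该词的文本数，以及类外包含该次的文本数
--     """
--     m=0;j=0;k=0;i=0
--     for l in range(len(lcontent)):
--         if clabel==lcontent[l]:
--             if word in count_list[l]:
--                 m+=1
--             else:
--                 j+=1
--         else:
--             if word in count_list[l]:
--                 k+=1
--             else:
--                 i+=1
--     return m,j,k,i
-- ===== SOURCE B (Python) =====
-- def n_containing(word, count_list, lcontent, clabel):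
--     pairs = list(zip(count_list, lcontent))
--     in_class = [docs for docs, lab in pairs if lab == clabel]
--     out_class = [docs for docs, lab in pairs if lab != clabel]
--     m = sum(word in docs for docs in in_class)
--     k = sum(word in docs for docs in out_class)
--     return m, len(in_class) - m, k, len(out_class) - k
-- ===== Notes on version B (the rewrite author's own statement) =====
-- stated objective: alternative
-- what changed: B replaces A's single index loop with a four-way branch by partitioning the zipped (doc,label) pairs into in-class/out-class groups, counting word-containing docs per group, and deriving the complements by subtraction from group sizes.
import Mathlib
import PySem

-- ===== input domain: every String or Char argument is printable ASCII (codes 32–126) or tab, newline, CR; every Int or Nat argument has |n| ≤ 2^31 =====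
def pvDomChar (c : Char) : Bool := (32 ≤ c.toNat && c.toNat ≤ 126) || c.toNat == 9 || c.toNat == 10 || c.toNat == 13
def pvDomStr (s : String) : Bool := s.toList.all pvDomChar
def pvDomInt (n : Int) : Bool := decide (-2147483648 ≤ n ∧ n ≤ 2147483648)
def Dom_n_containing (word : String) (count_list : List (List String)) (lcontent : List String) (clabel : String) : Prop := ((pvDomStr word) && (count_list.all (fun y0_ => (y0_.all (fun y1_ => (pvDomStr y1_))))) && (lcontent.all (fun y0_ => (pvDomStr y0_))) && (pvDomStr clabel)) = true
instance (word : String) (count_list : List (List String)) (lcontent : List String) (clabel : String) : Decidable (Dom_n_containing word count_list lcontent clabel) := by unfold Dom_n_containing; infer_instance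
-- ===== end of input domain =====

-- B partitions the zipped (doc,label) pairs into in-class/out-class groups, counts
-- word-containing docs per group, and derives the complements by subtraction (objective: alternative).

-- ===== PORT A =====
-- A's loop over l in range(len(lcontent)), branching on the label and on membership;
-- getD is exact inside Pre_ (every index in range).
def n_containing (word : String) (count_list : List (List String)) (lcontent : List String) (clabel : String) : Int × Int × Int × Int :=
  (List.range lcontent.length).foldl
    (fun (st : Int × Int × Int × Int) l =>
      let (m, j, k, i) := st
      if clabel = lcontent.getD l "" then
        if word ∈ count_list.getD l [] then (m + 1, j, k, i) else (m, j + 1, k, i)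
      else
        if word ∈ count_list.getD l [] then (m, j, k + 1, i) else (m, j, k, i + 1))
    (0, 0, 0, 0)

-- ===== PORT B =====
def n_containing_alt (word : String) (count_list : List (List String)) (lcontent : List String) (clabel : String) : Int × Int × Int × Int :=
  let pairs := List.zip count_list lcontent
  let in_class := (pairs.filter (fun p => p.2 = clabel)).map Prod.fst
  let out_class := (pairs.filter (fun p => ¬ p.2 = clabel)).map Prod.fst
  let m : Int := in_class.countP (fun docs => word ∈ docs)
  let k : Int := out_class.countP (fun docs => word ∈ docs)
  (m, (in_class.length : Int) - m, k, (out_class.length : Int) - k)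

-- ===== PRECONDITION & SPEC =====
-- Pre_ excludes exactly the inputs where A raises IndexError: count_list shorter than lcontent.
def Pre_n_containing (word : String) (count_list : List (List String)) (lcontent : List String) (clabel : String) : Prop :=
  lcontent.length ≤ count_list.length
instance (word : String) (count_list : List (List String)) (lcontent : List String) (clabel : String) : Decidable (Pre_n_containing word count_list lcontent clabel) := by unfold Pre_n_containing; infer_instance
def pvWitness_n_containing : String × List (List String) × List String × String :=
  ("a", [["a", "b"], ["c"]], ["x", "y"], "x")

def Spec_n_containing (word : String) (count_list : List (List String)) (lcontent : List String) (clabel : String) (out : Int × Int × Int × Int) : Prop := out = n_containing_alt word count_list lcontent clabel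
instance (word : String) (count_list : List (List String)) (lcontent : List String) (clabel : String) (out : Int × Int × Int × Int) : Decidable (Spec_n_containing word count_list lcontent clabel out) := by unfold Spec_n_containing; infer_instance

-- ===== CLAIM (what is proved, stated in full; the proofs are below) =====
def Claim_equal_n_containing : Prop := ∀ (word : String) (count_list : List (List String)) (lcontent : List String) (clabel : String), Dom_n_containing word count_list lcontent clabel → Pre_n_containing word count_list lcontent clabel → Spec_n_containing word count_list lcontent clabel (n_containing word count_list lcontent clabel)

-- ===== LEMMAS AND PROOFS =====

-- A's index loop, re-expressed as a fold over the zipped pairs (valid when every index is in range).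
theorem nA_fold_zip (word clabel : String) :
    ∀ (count_list : List (List String)) (lcontent : List String),
      lcontent.length ≤ count_list.length → ∀ (st : Int × Int × Int × Int),
      (List.range lcontent.length).foldl
        (fun (st : Int × Int × Int × Int) l =>
          let (m, j, k, i) := st
          if clabel = lcontent.getD l "" then
            if word ∈ count_list.getD l [] then (m + 1, j, k, i) else (m, j + 1, k, i)
          else
            if word ∈ count_list.getD l [] then (m, j, k + 1, i) else (m, j, k, i + 1)) st
      = (List.zip count_list lcontent).foldl
        (fun (st : Int × Int × Int × Int) p =>
          let (m, j, k, i) := st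
          if clabel = p.2 then
            if word ∈ p.1 then (m + 1, j, k, i) else (m, j + 1, k, i)
          else
            if word ∈ p.1 then (m, j, k + 1, i) else (m, j, k, i + 1)) st := by
  intro count_list lcontent
  induction lcontent generalizing count_list with
  | nil => intro _ st; simp
  | cons a lc ih =>
    intro h st
    cases count_list with
    | nil => simp at h
    | cons c cl =>
      simp only [List.length_cons, List.range_succ_eq_map, List.foldl_cons, List.foldl_map,
        List.zip_cons_cons]
      rw [show ∀ st', (List.range lc.length).foldl
          (fun (st : Int × Int × Int × Int) l =>
            let (m, j, k, i) := st
            if clabel = (a :: lc).getD (l + 1) "" then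
              if word ∈ (c :: cl).getD (l + 1) [] then (m + 1, j, k, i) else (m, j + 1, k, i)
            else
              if word ∈ (c :: cl).getD (l + 1) [] then (m, j, k + 1, i) else (m, j, k, i + 1)) st'
          = (List.zip cl lc).foldl
          (fun (st : Int × Int × Int × Int) p =>
            let (m, j, k, i) := st
            if clabel = p.2 then
              if word ∈ p.1 then (m + 1, j, k, i) else (m, j + 1, k, i)
            else
              if word ∈ p.1 then (m, j, k + 1, i) else (m, j, k, i + 1)) st'
        from fun st' => by
          rw [← ih cl (by simpa using h) st']
          simp only [List.getD_cons_succ]]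
      simp [List.getD]

-- The fold over pairs, characterised by the four partition counts.
theorem fold_zip_counts (word clabel : String) :
    ∀ (zs : List (List String × String)) (m j k i : Int),
      zs.foldl
        (fun (st : Int × Int × Int × Int) p =>
          let (m, j, k, i) := st
          if clabel = p.2 then
            if word ∈ p.1 then (m + 1, j, k, i) else (m, j + 1, k, i)
          else
            if word ∈ p.1 then (m, j, k + 1, i) else (m, j, k, i + 1)) (m, j, k, i)
      = (m + ((zs.filter (fun p => p.2 = clabel)).map Prod.fst).countP (fun docs => word ∈ docs),
         j + (((zs.filter (fun p => p.2 = clabel)).map Prod.fst).length : Int)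
           - ((zs.filter (fun p => p.2 = clabel)).map Prod.fst).countP (fun docs => word ∈ docs),
         k + ((zs.filter (fun p => ¬ p.2 = clabel)).map Prod.fst).countP (fun docs => word ∈ docs),
         i + (((zs.filter (fun p => ¬ p.2 = clabel)).map Prod.fst).length : Int)
           - ((zs.filter (fun p => ¬ p.2 = clabel)).map Prod.fst).countP (fun docs => word ∈ docs)) := by
  intro zs
  induction zs with
  | nil => intro m j k i; simp
  | cons p zs ih =>
    intro m j k i
    rcases p with ⟨docs, lab⟩
    simp only [List.foldl_cons]
    by_cases hl : clabel = lab
    · subst hl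
      by_cases hw : word ∈ docs <;>
        · simp [hw, ih]
          omega
    · have hl' : ¬ lab = clabel := fun h => hl h.symm
      by_cases hw : word ∈ docs <;>
        · simp [hl, hl', hw, ih]
          omega

-- ===== VERDICT (by name: the statement is the Claim_ definition above) =====
theorem n_containing_spec : Claim_equal_n_containing := by
  intro word count_list lcontent clabel _ hpre
  unfold Spec_n_containing n_containing n_containing_alt
  rw [nA_fold_zip word clabel count_list lcontent hpre, fold_zip_counts]
  simp
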